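-- pv_equiv track=rewrite | github.com/pthom/litgen | src/codemanip/code_utils.py | code_set_max_consecutive_empty_lines
-- ===== SOURCE A (Python) =====
-- from typing import Any, Optional, TypeVar
--
-- T = TypeVar("T")
--
-- def run_length_encode(in_list: list[T]) -> list[tuple[T, int]]:
--     if in_list is None or len(in_list) == 0:
--         return []
--
--     out_list = [(in_list[0], 1)]
--
--     for item in in_list[1:]:
--         # If same as last, up count, otherwise new element with count 1.
--         if item == out_list[-1][0]:
--             out_list[-1] = (item, out_list[-1][1] + 1)  # type: ignore
--         else:
--             out_list.append((item, 1))
--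
--     return out_list  # type: ignore
--
-- def code_set_max_consecutive_empty_lines(code: str, nb_max_empty: int) -> str:
--     if nb_max_empty < 0:
--         return code
--
--     lines = code.split("\n")
--     rle: list[tuple[str, int]] = run_length_encode(lines)
--
--     new_lines = []
--     for line, nb in rle:
--         if len(line.strip()) == 0 and nb >= nb_max_empty:  # noqa
--             nb = nb_max_empty
--         for _ in range(nb):
--             new_lines.append(line)
--     return "\n".join(new_lines)
-- ===== SOURCE B (Python) =====
-- def code_set_max_consecutive_empty_lines(code: str, nb_max_empty: int) -> str:
--     if nb_max_empty < 0:
--         return code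
--     new_lines = []
--     prev_line = None
--     count = 0
--     for line in code.split("\n"):
--         if line == prev_line:
--             count += 1
--         else:
--             prev_line = line
--             count = 1
--         if line.strip() == "" and count > nb_max_empty:
--             continue
--         new_lines.append(line)
--     return "\n".join(new_lines)
-- ===== Notes on version B (the rewrite author's own statement) =====
-- stated objective: simpler
-- what changed: Replaces the run_length_encode pass plus a second emit loop (with an inner range loop) by one streaming pass that tracks prev_line and a run counter and skips whitespace-only lines once the run exceeds nb_max_empty.
import Mathlib
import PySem

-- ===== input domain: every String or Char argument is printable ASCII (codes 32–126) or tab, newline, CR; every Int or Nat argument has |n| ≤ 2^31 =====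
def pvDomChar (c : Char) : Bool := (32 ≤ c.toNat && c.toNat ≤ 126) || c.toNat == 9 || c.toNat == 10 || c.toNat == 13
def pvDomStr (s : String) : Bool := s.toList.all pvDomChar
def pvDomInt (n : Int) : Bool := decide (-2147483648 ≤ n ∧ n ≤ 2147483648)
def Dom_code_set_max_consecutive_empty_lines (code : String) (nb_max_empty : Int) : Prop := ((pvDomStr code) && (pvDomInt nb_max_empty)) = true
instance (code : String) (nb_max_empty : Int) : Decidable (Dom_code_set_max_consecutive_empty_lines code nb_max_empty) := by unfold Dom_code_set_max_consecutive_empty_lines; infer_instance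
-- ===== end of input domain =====

-- B replaces A's run_length_encode pass plus a second emit loop by one streaming pass
-- (prev_line + run counter); same output, similar cost, fewer passes and no intermediate table.

-- ===== PORT A =====
-- port of run_length_encode (generic over the element type, as in the Python)
def run_length_encode {T : Type} [BEq T] (in_list : List T) : List (T × Int) :=
  match in_list with
  | [] => []
  | x :: rest =>
    rest.foldl (fun out_list item =>
      match out_list.getLast? with
      | some last =>
        if item == last.1 then
          out_list.dropLast ++ [(item, last.2 + 1)]
        else
          out_list ++ [(item, 1)]
      | none => out_list ++ [(item, 1)]) [(x, 1)]

def code_set_max_consecutive_empty_lines (code : String) (nb_max_empty : Int) : String :=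
  if nb_max_empty < 0 then code
  else
    let lines := (PySem.Str.split? code "\n").getD []
    let rle := run_length_encode lines
    let new_lines := rle.foldl (fun new_lines p =>
      let line := p.1
      let nb := if PySem.Str.len (PySem.Str.strip line) = 0 ∧ p.2 ≥ nb_max_empty then nb_max_empty else p.2
      new_lines ++ (PySem.List.pyRange 0 nb 1).map (fun _ => line)) []
    PySem.Str.join "\n" new_lines

-- ===== PORT B =====
def code_set_max_consecutive_empty_lines_alt (code : String) (nb_max_empty : Int) : String :=
  if nb_max_empty < 0 then code
  else
    let st := ((PySem.Str.split? code "\n").getD []).foldl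
      (fun (st : List String × Option String × Int) line =>
        let count := if some line == st.2.1 then st.2.2 + 1 else 1
        let prev := some line
        if PySem.Str.strip line = "" ∧ count > nb_max_empty then (st.1, prev, count)
        else (st.1 ++ [line], prev, count))
      ([], none, 0)
    PySem.Str.join "\n" st.1

-- ===== PRECONDITION & SPEC =====
def Spec_code_set_max_consecutive_empty_lines (code : String) (nb_max_empty : Int) (out : String) : Prop := out = code_set_max_consecutive_empty_lines_alt code nb_max_empty
instance (code : String) (nb_max_empty : Int) (out : String) : Decidable (Spec_code_set_max_consecutive_empty_lines code nb_max_empty out) := by unfold Spec_code_set_max_consecutive_empty_lines; infer_instance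

-- ===== CLAIM (what is proved, stated in full; the proofs are below) =====
def Claim_equal_code_set_max_consecutive_empty_lines : Prop := ∀ (code : String) (nb_max_empty : Int), Dom_code_set_max_consecutive_empty_lines code nb_max_empty → Spec_code_set_max_consecutive_empty_lines code nb_max_empty (code_set_max_consecutive_empty_lines code nb_max_empty)

-- ===== LEMMAS AND PROOFS =====

-- n copies of a line, as A's inner `for _ in range(nb)` loop produces them
def pvRep (line : String) (n : Int) : List String :=
  (PySem.List.pyRange 0 n 1).map (fun _ => line)

-- what A emits for one run (line, n)
def pvEmit (m : Int) (line : String) (n : Int) : List String :=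
  if PySem.Str.len (PySem.Str.strip line) = 0 ∧ n ≥ m then pvRep line m else pvRep line n

-- the rle step function of A
def pvStep : List (String × Int) → String → List (String × Int) :=
  fun out_list item =>
    match out_list.getLast? with
    | some last =>
      if item == last.1 then
        out_list.dropLast ++ [(item, last.2 + 1)]
      else
        out_list ++ [(item, 1)]
    | none => out_list ++ [(item, 1)]

-- B's step function
def pvBStep (m : Int) : (List String × Option String × Int) → String → (List String × Option String × Int) :=
  fun st line =>
    let count := if some line == st.2.1 then st.2.2 + 1 else 1
    let prev := some line
    if PySem.Str.strip line = "" ∧ count > m then (st.1, prev, count)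
    else (st.1 ++ [line], prev, count)

theorem pvRep_succ (line : String) (n : Int) (h : 0 ≤ n) :
    pvRep line (n + 1) = pvRep line n ++ [line] := by
  unfold pvRep
  rw [PySem.List.pyRange_one_succ_right h, List.map_append]
  rfl

theorem pvRep_zero (line : String) : pvRep line 0 = [] := rfl

theorem pvRep_one (line : String) : pvRep line 1 = [line] := rfl

theorem ws_iff (line : String) :
    (PySem.Str.len (PySem.Str.strip line) = 0) ↔ (PySem.Str.strip line = "") := by
  simp [PySem.Str.len, ← String.toList_inj]

theorem pvEmit_of_ws (m : Int) (l : String) (n : Int) (hw : PySem.Str.strip l = "") (h : n ≥ m) :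
    pvEmit m l n = pvRep l m := by
  unfold pvEmit
  rw [if_pos ⟨(ws_iff l).mpr hw, h⟩]

theorem pvEmit_of_ws_lt (m : Int) (l : String) (n : Int) (_hw : PySem.Str.strip l = "") (h : ¬ n ≥ m) :
    pvEmit m l n = pvRep l n := by
  unfold pvEmit
  rw [if_neg (fun hb => h hb.2)]

theorem pvEmit_of_not_ws (m : Int) (l : String) (n : Int) (_hw : ¬ PySem.Str.strip l = "") :
    pvEmit m l n = pvRep l n := by
  unfold pvEmit
  rw [if_neg (fun hb => _hw ((ws_iff l).mp hb.1))]

-- pvEmit for a fresh run of length 1, when the line is not skipped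
theorem pvEmit_one (m : Int) (l : String) (_hm : 0 ≤ m) (h : ¬ (PySem.Str.strip l = "" ∧ (1 : Int) > m)) :
    pvEmit m l 1 = [l] := by
  by_cases hw : PySem.Str.strip l = ""
  · have hm1 : (1 : Int) ≤ m := by
      by_contra hx
      exact h ⟨hw, by omega⟩
    by_cases h2 : (1 : Int) ≥ m
    · have hmeq : m = 1 := by omega
      rw [pvEmit_of_ws m l 1 hw h2, hmeq, pvRep_one]
    · rw [pvEmit_of_ws_lt m l 1 hw h2, pvRep_one]
  · rw [pvEmit_of_not_ws m l 1 hw, pvRep_one]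

-- pvEmit for a skipped fresh run (only possible when m = 0)
theorem pvEmit_one_skip (m : Int) (l : String) (hm : 0 ≤ m) (h : PySem.Str.strip l = "" ∧ (1 : Int) > m) :
    pvEmit m l 1 = [] := by
  have hm0 : m = 0 := by omega
  rw [pvEmit_of_ws m l 1 h.1 (by omega), hm0, pvRep_zero]

-- extending a run by one line: pvEmit grows by [l] iff the line is not skipped
theorem pvEmit_succ_keep (m : Int) (l : String) (c : Int) (_hm : 0 ≤ m) (hc : 1 ≤ c)
    (h : ¬ (PySem.Str.strip l = "" ∧ c + 1 > m)) :
    pvEmit m l c ++ [l] = pvEmit m l (c + 1) := by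
  by_cases hw : PySem.Str.strip l = ""
  · have hle : c + 1 ≤ m := by
      by_contra hx
      exact h ⟨hw, by omega⟩
    have h1 : ¬ c ≥ m := by omega
    rw [pvEmit_of_ws_lt m l c hw h1, ← pvRep_succ l c (by omega)]
    by_cases h2 : c + 1 ≥ m
    · have hmeq : m = c + 1 := by omega
      rw [pvEmit_of_ws m l (c + 1) hw h2, hmeq]
    · rw [pvEmit_of_ws_lt m l (c + 1) hw h2]
  · rw [pvEmit_of_not_ws m l c hw, pvEmit_of_not_ws m l (c + 1) hw, pvRep_succ l c (by omega)]

theorem pvEmit_succ_skip (m : Int) (l : String) (c : Int) (_hm : 0 ≤ m) (_hc : 1 ≤ c)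
    (h : PySem.Str.strip l = "" ∧ c + 1 > m) :
    pvEmit m l c = pvEmit m l (c + 1) := by
  have h1 : c ≥ m := by omega
  rw [pvEmit_of_ws m l c h.1 h1, pvEmit_of_ws m l (c + 1) h.1 (by omega)]

-- B's one step, written out
theorem pvBStep_eq (m : Int) (out : List String) (prev : Option String) (cnt : Int) (l : String) :
    pvBStep m (out, prev, cnt) l =
      (let count := if some l == prev then cnt + 1 else 1
       if PySem.Str.strip l = "" ∧ count > m then (out, some l, count)
       else (out ++ [l], some l, count)) := rfl

theorem pvStep_ne_nil (B : List (String × Int)) (l : String) : pvStep B l ≠ [] := by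
  unfold pvStep
  split
  all_goals try split
  all_goals simp

theorem pvStep_frozen (ls : List String) (A B : List (String × Int)) (hB : B ≠ []) :
    ls.foldl pvStep (A ++ B) = A ++ ls.foldl pvStep B := by
  induction ls generalizing B with
  | nil => rfl
  | cons l ls ih =>
    have hstep : pvStep (A ++ B) l = A ++ pvStep B l := by
      unfold pvStep
      rw [List.getLast?_append_of_ne_nil A hB]
      cases h : B.getLast? with
      | none => simp
      | some last =>
        by_cases hc : l == last.1 <;>
          simp [hc, List.dropLast_append_of_ne_nil hB]
    simp only [List.foldl_cons, hstep, ih (pvStep B l) (pvStep_ne_nil B l)]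

theorem pvEmit_fold (m : Int) (R : List (String × Int)) (init : List String) :
    R.foldl (fun acc p => acc ++ pvEmit m p.1 p.2) init = init ++ R.flatMap (fun p => pvEmit m p.1 p.2) :=
  PySem.List.foldl_append_eq_flatMap ..

-- the key streaming invariant: B's fold from a state holding a partial run equals A's rle-then-emit
theorem pvMain (m : Int) (hm : 0 ≤ m) (ls : List String) (out0 : List String) (p : String) (c : Int) (hc : 1 ≤ c) :
    (ls.foldl (pvBStep m) (out0 ++ pvEmit m p c, some p, c)).1
      = out0 ++ (ls.foldl pvStep [(p, c)]).flatMap (fun q => pvEmit m q.1 q.2) := by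
  induction ls generalizing out0 p c with
  | nil => simp
  | cons l ls ih =>
    simp only [List.foldl_cons]
    by_cases heq : l = p
    · subst heq
      have hstep : pvStep [(l, c)] l = [(l, c + 1)] := by
        unfold pvStep
        simp
      have hbeq : (some l == some l) = true := by simp
      by_cases hskip : PySem.Str.strip l = "" ∧ c + 1 > m
      · have hB : pvBStep m (out0 ++ pvEmit m l c, some l, c) l = (out0 ++ pvEmit m l c, some l, c + 1) := by
          rw [pvBStep_eq]
          simp only [hbeq, if_true]
          rw [if_pos hskip]
        rw [hB, pvEmit_succ_skip m l c hm hc hskip, hstep, ih out0 l (c + 1) (by omega)]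
      · have hB : pvBStep m (out0 ++ pvEmit m l c, some l, c) l
            = ((out0 ++ pvEmit m l c) ++ [l], some l, c + 1) := by
          rw [pvBStep_eq]
          simp only [hbeq, if_true]
          rw [if_neg hskip]
        rw [hB, List.append_assoc, pvEmit_succ_keep m l c hm hc hskip, hstep,
          ih out0 l (c + 1) (by omega)]
    · have hstep : pvStep [(p, c)] l = [(p, c), (l, 1)] := by
        unfold pvStep
        simp [heq]
      have hsplit : ls.foldl pvStep [(p, c), (l, 1)] = [(p, c)] ++ ls.foldl pvStep [(l, 1)] := by
        have h := pvStep_frozen ls [(p, c)] [(l, 1)] (by simp)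
        simpa using h
      have hbeq : (some l == some p) = false := by simp [heq]
      by_cases hskip : PySem.Str.strip l = "" ∧ (1 : Int) > m
      · have hB : pvBStep m (out0 ++ pvEmit m p c, some p, c) l = (out0 ++ pvEmit m p c, some l, 1) := by
          rw [pvBStep_eq]
          simp only [hbeq, Bool.false_eq_true, if_false]
          rw [if_pos hskip]
        have harr : out0 ++ pvEmit m p c = (out0 ++ pvEmit m p c) ++ pvEmit m l 1 := by
          rw [pvEmit_one_skip m l hm hskip, List.append_nil]
        rw [hB, harr, ih (out0 ++ pvEmit m p c) l 1 (by omega), hstep, hsplit]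
        simp
      · have hB : pvBStep m (out0 ++ pvEmit m p c, some p, c) l
            = ((out0 ++ pvEmit m p c) ++ [l], some l, 1) := by
          rw [pvBStep_eq]
          simp only [hbeq, Bool.false_eq_true, if_false]
          rw [if_neg hskip]
        rw [hB, show (out0 ++ pvEmit m p c) ++ [l] = (out0 ++ pvEmit m p c) ++ pvEmit m l 1 by
            rw [pvEmit_one m l hm hskip],
          ih (out0 ++ pvEmit m p c) l 1 (by omega), hstep, hsplit]
        simp

-- ===== VERDICT (by name: the statement is the Claim_ definition above) =====
theorem code_set_max_consecutive_empty_lines_spec : Claim_equal_code_set_max_consecutive_empty_lines := by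
  intro code m _
  show code_set_max_consecutive_empty_lines code m = code_set_max_consecutive_empty_lines_alt code m
  unfold code_set_max_consecutive_empty_lines code_set_max_consecutive_empty_lines_alt
  by_cases hm : m < 0
  · simp [hm]
  · simp only [if_neg hm]
    have hm' : 0 ≤ m := by omega
    have hAfun : (fun (new_lines : List String) (p : String × Int) =>
        let line := p.1
        let nb := if PySem.Str.len (PySem.Str.strip line) = 0 ∧ p.2 ≥ m then m else p.2
        new_lines ++ (PySem.List.pyRange 0 nb 1).map (fun _ => line))
        = (fun (acc : List String) (p : String × Int) => acc ++ pvEmit m p.1 p.2) := by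
      funext acc p
      by_cases h : PySem.Str.len (PySem.Str.strip p.1) = 0 ∧ p.2 ≥ m
      · simp only [pvEmit, pvRep, if_pos h]
      · simp only [pvEmit, pvRep, if_neg h]
    rw [hAfun]
    cases hls : (PySem.Str.split? code "\n").getD [] with
    | nil => rfl
    | cons x rest =>
      have hA : run_length_encode (x :: rest) = rest.foldl pvStep [(x, 1)] := by
        simp only [run_length_encode]
        congr 1
        funext o i
        unfold pvStep
        cases o.getLast? <;> rfl
      have hfirst : pvBStep m ([], none, 0) x = ([] ++ pvEmit m x 1, some x, 1) := by
        rw [pvBStep_eq]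
        have hbeq : (some x == (none : Option String)) = false := rfl
        simp only [hbeq, Bool.false_eq_true, if_false]
        by_cases hskip : PySem.Str.strip x = "" ∧ (1 : Int) > m
        · rw [if_pos hskip, pvEmit_one_skip m x hm' hskip]
          rfl
        · rw [if_neg hskip, pvEmit_one m x hm' hskip]
      show PySem.Str.join "\n" ((run_length_encode (x :: rest)).foldl
            (fun acc p => acc ++ pvEmit m p.1 p.2) [])
          = PySem.Str.join "\n" (((x :: rest).foldl (pvBStep m) ([], none, 0)).1)
      rw [hA, pvEmit_fold, List.foldl_cons, hfirst,
        pvMain m hm' rest [] x 1 (by omega)]
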